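-- pv_equiv track=rewrite | github.com/pinnecke/slideshowbob | build.py | extract_personal_info
-- ===== SOURCE A (Python) =====
-- def extract_personal_info(personal_slide_md):
-- 	ret = dict()
-- 	current_section = "unknown"
-- 	current_item = "null"
--
-- 	for line in personal_slide_md.replace("\r", "").split('\n'):
-- 		line = line.strip()
-- 		if (line.startswith("##")):
-- 			current_section = line.replace("##", "", 1).strip()
-- 			continue
-- 		else:
-- 			if (line.startswith("-")):
-- 				current_item = line.replace("-", "").strip()
-- 			else:
-- 				current_item += " " + line.strip()
-- 				continue
--
-- 		if current_section not in ret: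
-- 			ret[current_section] = list()
--
-- 		ret[current_section].append(current_item)
--
-- 	return ret
-- ===== SOURCE B (Python) =====
-- def extract_personal_info(personal_slide_md):
--     lines = [l.strip() for l in personal_slide_md.replace("\r", "").split('\n')]
--
--     # Pass 1: partition into (section, body-lines) blocks, cutting at '##' headers;
--     # text before the first header forms the implicit "unknown" block.
--     blocks = []
--     section = "unknown"
--     body = []
--     for line in lines:
--         if line.startswith("##"):
--             blocks.append((section, body))
--             section = line.replace("##", "", 1).strip()
--             body = []
--         else:
--             body.append(line)
--     blocks.append((section, body))
--
--     # Pass 2: collect the dash items of each block under its section name.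
--     ret = {}
--     for section, body in blocks:
--         for line in body:
--             if line.startswith("-"):
--                 ret.setdefault(section, []).append(line.replace("-", "").strip())
--     return ret
-- ===== Notes on version B (the rewrite author's own statement) =====
-- stated objective: alternative
-- what changed: Replaces A's single flat stateful loop (section/item registers mutated in place) with a two-pass decomposition: first partition the stripped lines into header-delimited blocks, then collect each block's dash items into the dict with setdefault.
import Mathlib
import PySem

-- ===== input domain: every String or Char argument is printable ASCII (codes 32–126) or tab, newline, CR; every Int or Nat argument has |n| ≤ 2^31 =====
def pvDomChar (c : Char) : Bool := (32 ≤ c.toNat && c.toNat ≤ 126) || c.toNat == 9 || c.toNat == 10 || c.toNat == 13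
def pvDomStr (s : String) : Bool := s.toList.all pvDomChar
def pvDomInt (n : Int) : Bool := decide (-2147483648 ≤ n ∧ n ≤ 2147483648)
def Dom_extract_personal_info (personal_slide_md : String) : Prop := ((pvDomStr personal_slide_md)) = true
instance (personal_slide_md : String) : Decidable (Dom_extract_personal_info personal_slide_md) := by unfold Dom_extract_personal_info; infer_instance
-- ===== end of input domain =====

-- B replaces A's single flat stateful loop with a two-pass decomposition (split into
-- header-delimited blocks, then collect each block's dash items); objective: alternative
-- structure, same O(n) cost. Return value only (neither program mutates its argument).

-- shared text helpers (both Pythons use the identical expressions)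
-- s.replace("##", "", 1): removes the FIRST occurrence of "##" only — ported by hand
-- (exact: left-to-right scan, first match removed, nothing else touched)
def pyReplaceHash2Once : List Char → List Char
  | '#' :: '#' :: rest => rest
  | c :: rest => c :: pyReplaceHash2Once rest
  | [] => []

def strReplaceHash2Once (s : String) : String := String.ofList (pyReplaceHash2Once s.toList)

-- md.replace("\r","").split('\n'); the separator "\n" is nonempty so split? is never none
def pySplitNL (s : String) : List String :=
  (PySem.Str.split? (PySem.Str.replace s "\r" "") "\n").getD []

-- ===== PORT A =====
def AStep (st : PySem.Dict String (List String) × String × String) (rawline : String) :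
    PySem.Dict String (List String) × String × String :=
  let ret := st.1
  let current_section := st.2.1
  let current_item := st.2.2
  let line := PySem.Str.strip rawline
  if PySem.Str.startswith line "##" then
    (ret, PySem.Str.strip (strReplaceHash2Once line), current_item)
  else if PySem.Str.startswith line "-" then
    let current_item := PySem.Str.strip (PySem.Str.replace line "-" "")
    let ret := if ret.contains current_section then ret else ret.insert current_section []
    (ret.modify current_section [] (fun xs => xs ++ [current_item]), current_section, current_item)
  else
    (ret, current_section, current_item ++ " " ++ PySem.Str.strip line)

def extract_personal_info (personal_slide_md : String) : List (String × List String) :=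
  ((pySplitNL personal_slide_md).foldl AStep (PySem.Dict.empty, "unknown", "null")).1.items

-- ===== PORT B =====
-- pass-1 step: cut a new block at each '##' header
def BBlockStep (st : List (String × List String) × String × List String) (line : String) :
    List (String × List String) × String × List String :=
  if PySem.Str.startswith line "##" then
    (st.1 ++ [(st.2.1, st.2.2)], PySem.Str.strip (strReplaceHash2Once line), [])
  else
    (st.1, st.2.1, st.2.2 ++ [line])

-- pass-2 step: ret.setdefault(sec, []).append(line.replace("-","").strip()) on dash lines
def BDashStep (sec : String) (ret : PySem.Dict String (List String)) (line : String) :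
    PySem.Dict String (List String) :=
  if PySem.Str.startswith line "-" then
    (ret.setdefault sec []).modify sec [] (fun xs => xs ++ [PySem.Str.strip (PySem.Str.replace line "-" "")])
  else ret

def extract_personal_info_alt (personal_slide_md : String) : List (String × List String) :=
  let lines := (pySplitNL personal_slide_md).map PySem.Str.strip
  let st := lines.foldl BBlockStep ([], "unknown", [])
  let blocks := st.1 ++ [(st.2.1, st.2.2)]
  (blocks.foldl (fun ret sb => sb.2.foldl (BDashStep sb.1) ret) PySem.Dict.empty).items

-- ===== PRECONDITION & SPEC =====
def Spec_extract_personal_info (personal_slide_md : String) (out : List (String × List String)) : Prop := out = extract_personal_info_alt personal_slide_md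
instance (personal_slide_md : String) (out : List (String × List String)) : Decidable (Spec_extract_personal_info personal_slide_md out) := by unfold Spec_extract_personal_info; infer_instance

-- ===== CLAIM (what is proved, stated in full; the proofs are below) =====
def Claim_equal_extract_personal_info : Prop := ∀ (personal_slide_md : String), Dom_extract_personal_info personal_slide_md → Spec_extract_personal_info personal_slide_md (extract_personal_info personal_slide_md)

-- ===== LEMMAS AND PROOFS =====

-- reference recursion: A's loop read block-wise on the STRIPPED lines
def procBlocks (d : PySem.Dict String (List String)) (sec : String) : List String → PySem.Dict String (List String)
  | [] => d
  | l :: t =>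
    if PySem.Str.startswith l "##" then procBlocks d (PySem.Str.strip (strReplaceHash2Once l)) t
    else procBlocks (BDashStep sec d l) sec t

-- A's contains/insert-then-append dict update is B's setdefault-then-append update
lemma AStep_dash_dict (d : PySem.Dict String (List String)) (sec : String) (f : List String → List String) :
    (if d.contains sec then d else d.insert sec []).modify sec [] f = (d.setdefault sec []).modify sec [] f := by
  by_cases h : d.contains sec = true
  · rw [PySem.Dict.setdefault_of_contains d _ h, if_pos h]
  · rw [PySem.Dict.setdefault_of_not_contains d _ (by simpa using h), if_neg h]

-- A's fold computes procBlocks over the stripped lines, whatever current_item holds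
lemma A_eq_procBlocks : ∀ (ls : List String) (d : PySem.Dict String (List String)) (sec item : String),
    (ls.foldl AStep (d, sec, item)).1 = procBlocks d sec (ls.map PySem.Str.strip) := by
  intro ls
  induction ls with
  | nil => intro d sec item; simp [procBlocks]
  | cons l t ih =>
    intro d sec item
    simp only [List.foldl_cons, List.map_cons, AStep]
    by_cases h1 : PySem.Chars.startswith (PySem.Chars.strip l.toList) ['#', '#'] = true
    · simp [procBlocks, h1, ih]
    · by_cases h2 : PySem.Chars.startswith (PySem.Chars.strip l.toList) ['-'] = true
      · simp [procBlocks, h1, h2, ih, BDashStep, AStep_dash_dict]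
      · simp [procBlocks, h1, h2, ih, BDashStep]

-- B's dict after processing a finished block list
def BProc (d : PySem.Dict String (List String)) (bs : List (String × List String)) : PySem.Dict String (List String) :=
  bs.foldl (fun ret sb => sb.2.foldl (BDashStep sb.1) ret) d

-- B's block-building fold followed by block processing computes procBlocks
lemma B_eq_procBlocks : ∀ (ls : List String) (bs : List (String × List String)) (sec : String)
    (body : List String) (d : PySem.Dict String (List String)),
    (let st := ls.foldl BBlockStep (bs, sec, body)
     BProc d (st.1 ++ [(st.2.1, st.2.2)]))
      = procBlocks (body.foldl (BDashStep sec) (BProc d bs)) sec ls := by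
  intro ls
  induction ls with
  | nil =>
    intro bs sec body d
    simp [procBlocks, BProc, List.foldl_append]
  | cons l t ih =>
    intro bs sec body d
    simp only [List.foldl_cons, BBlockStep]
    by_cases h1 : PySem.Chars.startswith l.toList ['#', '#'] = true
    · simp only [PySem.Str.startswith_eq]
      rw [ih]
      simp [procBlocks, h1, BProc, List.foldl_append]
    · simp only [PySem.Str.startswith_eq]
      rw [ih]
      simp [procBlocks, h1, List.foldl_append]

-- ===== VERDICT (by name: the statement is the Claim_ definition above) =====
theorem extract_personal_info_spec : Claim_equal_extract_personal_info := by
  intro md _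
  show extract_personal_info md = extract_personal_info_alt md
  unfold extract_personal_info extract_personal_info_alt
  rw [A_eq_procBlocks]
  have h := B_eq_procBlocks ((pySplitNL md).map PySem.Str.strip) [] "unknown" [] PySem.Dict.empty
  simp only [List.foldl_nil, BProc] at h
  rw [← h]
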